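-- pv_equiv track=rewrite | github.com/WYI1223/dt | material/siSort.py | _encode_pi
-- ===== SOURCE A (Python) =====
-- def _encode_pi(sub):
--     pi = []
--     for i, x in enumerate(sub):
--         idx = 0
--         for j in range(i):
--             if sub[j] < x:
--                 idx = j + 1
--         pi.append(idx)
--     return pi
-- ===== SOURCE B (Python) =====
-- def _encode_pi(sub):
--     # Monotonic stack of (value, index+1) pairs, values strictly decreasing
--     # from top: the top-most pair with value < x is the rightmost smaller
--     # predecessor.  One pass, O(n) amortised.
--     pi = []
--     stack = []
--     for i, x in enumerate(sub):
--         while stack and stack[-1][0] >= x: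
--             stack.pop()
--         pi.append(stack[-1][1] if stack else 0)
--         stack.append((x, i + 1))
--     return pi
-- ===== Notes on version B (the rewrite author's own statement) =====
-- stated objective: faster
-- what changed: Replaced the quadratic rescan of all earlier elements with a single pass keeping a monotonic stack of (value, index+1) pairs, so the rightmost smaller predecessor is the stack top after popping larger-or-equal values.
import Mathlib
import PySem

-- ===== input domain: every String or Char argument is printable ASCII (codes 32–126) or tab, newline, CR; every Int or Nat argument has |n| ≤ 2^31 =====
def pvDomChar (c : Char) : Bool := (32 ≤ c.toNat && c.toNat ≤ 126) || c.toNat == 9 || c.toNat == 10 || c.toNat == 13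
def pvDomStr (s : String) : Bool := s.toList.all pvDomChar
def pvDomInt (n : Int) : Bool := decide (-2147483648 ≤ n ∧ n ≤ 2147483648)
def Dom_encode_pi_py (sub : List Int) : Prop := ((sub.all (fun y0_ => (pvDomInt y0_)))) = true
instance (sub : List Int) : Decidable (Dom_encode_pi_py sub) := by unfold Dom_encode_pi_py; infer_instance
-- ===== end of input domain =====

-- B replaces A's quadratic rescan of all earlier elements by one pass with a
-- monotonic stack of (value, index+1) pairs (objective: faster).

-- ===== PORT A =====
-- for i, x in enumerate(sub): idx = 0; for j in range(i): if sub[j] < x: idx = j + 1; pi.append(idx)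
def encode_pi_py (sub : List Int) : List Int :=
  (PySem.List.enumerate sub 0).foldl
    (fun pi ix =>
      pi ++ [(PySem.List.pyRange 0 ix.1 1).foldl
        (fun idx j => if PySem.List.pyGetD sub j 0 < ix.2 then j + 1 else idx) 0])
    []

-- ===== PORT B =====
-- while stack and stack[-1][0] >= x: stack.pop()  →  dropWhile; stack head = Python stack[-1]
def encodeAltGo (stack : List (Int × Int)) (i : Int) : List Int → List Int
  | [] => []
  | x :: rest =>
    let s := stack.dropWhile (fun p => decide (x ≤ p.1))
    (match s with | [] => 0 | p :: _ => p.2) :: encodeAltGo ((x, i + 1) :: s) (i + 1) rest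

def encode_pi_py_alt (sub : List Int) : List Int := encodeAltGo [] 0 sub

-- ===== PRECONDITION & SPEC =====
def Spec_encode_pi_py (sub : List Int) (out : List Int) : Prop := out = encode_pi_py_alt sub
instance (sub : List Int) (out : List Int) : Decidable (Spec_encode_pi_py sub out) := by unfold Spec_encode_pi_py; infer_instance

-- ===== CLAIM (what is proved, stated in full; the proofs are below) =====
def Claim_equal_encode_pi_py : Prop := ∀ (sub : List Int), Dom_encode_pi_py sub → Spec_encode_pi_py sub (encode_pi_py sub)

-- ===== LEMMAS AND PROOFS =====

-- rightmost-smaller index (+1), scanned left to right like A's inner loop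
def rmsAux : List Int → Int → Int → Int → Int
  | [], _, _, acc => acc
  | v :: rest, x, i, acc => rmsAux rest x (i + 1) (if v < x then i + 1 else acc)

def rms (pref : List Int) (x : Int) : Int := rmsAux pref x 0 0

-- the canonical monotonic stack of a prefix
def csAux : List Int → Int → List (Int × Int) → List (Int × Int)
  | [], _, st => st
  | x :: rest, i, st => csAux rest (i + 1) ((x, i + 1) :: st.dropWhile (fun p => decide (x ≤ p.1)))

def cs (pref : List Int) : List (Int × Int) := csAux pref 0 []

def extractAns (x : Int) (st : List (Int × Int)) : Int :=
  match st.dropWhile (fun p => decide (x ≤ p.1)) with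
  | [] => 0
  | p :: _ => p.2

-- common model of both programs: per element, answer on the prefix so far
def model : List Int → List Int → List Int
  | _, [] => []
  | pref, x :: rest => rms pref x :: model (pref ++ [x]) rest

theorem rmsAux_append (l : List Int) (v x i acc : Int) :
    rmsAux (l ++ [v]) x i acc
      = if v < x then i + (l.length : Int) + 1 else rmsAux l x i acc := by
  induction l generalizing i acc with
  | nil => simp [rmsAux]
  | cons a l ih =>
    simp only [List.cons_append, rmsAux, ih, List.length_cons]
    split_ifs <;> push_cast <;> ring_nf

theorem csAux_append (l : List Int) (v i : Int) (st : List (Int × Int)) :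
    csAux (l ++ [v]) i st
      = (v, i + (l.length : Int) + 1)
          :: (csAux l i st).dropWhile (fun p => decide (v ≤ p.1)) := by
  induction l generalizing i st with
  | nil => simp [csAux]
  | cons a l ih =>
    simp only [List.cons_append, csAux, ih, List.length_cons]
    push_cast; ring_nf

theorem dropWhile_dropWhile_of_imp {α : Type} (p q : α → Bool)
    (h : ∀ a, q a = true → p a = true) (l : List α) :
    (l.dropWhile q).dropWhile p = l.dropWhile p := by
  induction l with
  | nil => rfl
  | cons a l ih =>
    by_cases hq : q a = true
    · rw [List.dropWhile_cons_of_pos hq, ih, List.dropWhile_cons_of_pos (h a hq)]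
    · rw [List.dropWhile_cons_of_neg (by simp [hq])]

theorem extract_cs (pref : List Int) (x : Int) :
    extractAns x (cs pref) = rms pref x := by
  induction pref using List.reverseRecOn with
  | nil => rfl
  | append_singleton l v ih =>
    have hcs : cs (l ++ [v])
        = (v, (l.length : Int) + 1) :: (cs l).dropWhile (fun p => decide (v ≤ p.1)) := by
      simpa using csAux_append l v 0 []
    have hrms : rms (l ++ [v]) x
        = if v < x then (l.length : Int) + 1 else rms l x := by
      simpa using rmsAux_append l v x 0 0
    by_cases hvx : v < x
    · have : ¬ (x ≤ v) := by omega
      simp [extractAns, hcs, hrms, hvx, this]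
    · have hxv : x ≤ v := by omega
      have hmono : ((cs l).dropWhile (fun p => decide (v ≤ p.1))).dropWhile
            (fun p => decide (x ≤ p.1)) = (cs l).dropWhile (fun p => decide (x ≤ p.1)) :=
        dropWhile_dropWhile_of_imp _ _ (by intro a ha; simp at ha ⊢; omega) _
      rw [hrms, if_neg hvx, ← ih]
      simp only [extractAns, hcs]
      rw [List.dropWhile_cons_of_pos (by simp [hxv]), hmono]

theorem altGo_model (rest pref : List Int) :
    encodeAltGo (cs pref) (pref.length : Int) rest = model pref rest := by
  induction rest generalizing pref with
  | nil => rfl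
  | cons x rest ih =>
    have hcs : (x, (pref.length : Int) + 1) :: (cs pref).dropWhile (fun p => decide (x ≤ p.1))
        = cs (pref ++ [x]) := by
      simpa using (csAux_append pref x 0 []).symm
    have hlen : (pref.length : Int) + 1 = ((pref ++ [x]).length : Int) := by
      simp
    have hhd : (match (cs pref).dropWhile (fun p => decide (x ≤ p.1)) with
        | [] => (0 : Int) | p :: _ => p.2) = rms pref x := extract_cs pref x
    simp only [encodeAltGo, model]
    rw [hhd, hcs, hlen, ih]

-- A's inner loop on range(i) equals rms on the length-i prefix
theorem inner_rms (sub : List Int) (x : Int) (k : Nat) (hk : k ≤ sub.length) :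
    (PySem.List.pyRange 0 (k : Int) 1).foldl
        (fun idx j => if PySem.List.pyGetD sub j 0 < x then j + 1 else idx) 0
      = rms (sub.take k) x := by
  induction k with
  | zero => simp [rms, rmsAux]
  | succ k ih =>
    have hk' : k < sub.length := by omega
    have hsplit : PySem.List.pyRange 0 ((k + 1 : Nat) : Int) 1
        = PySem.List.pyRange 0 (k : Int) 1 ++ [(k : Int)] := by
      push_cast
      exact PySem.List.pyRange_one_succ_right (by omega)
    have hget : PySem.List.pyGetD sub (k : Int) 0 = sub[k] := by
      rw [PySem.List.pyGetD_eq_getElem] <;> simp [hk']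
    have htake : sub.take (k + 1) = sub.take k ++ [sub[k]] := by
      simpa using (List.take_concat_get sub k hk').symm
    have happ := rmsAux_append (sub.take k) (sub[k]) x 0 0
    have hlen : ((sub.take k).length : Int) = (k : Int) := by
      simp [List.length_take, Nat.min_eq_left (Nat.le_of_lt hk')]
    rw [hsplit, List.foldl_append, ih (by omega), htake]
    simp only [List.foldl_cons, List.foldl_nil, hget, rms, happ, hlen]
    split_ifs <;> ring_nf

theorem A_fold (sub : List Int) (rest : List Int) (k : Nat) (acc : List Int)
    (hrest : rest = sub.drop k) (hk : k ≤ sub.length) :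
    (PySem.List.enumerate rest (k : Int)).foldl
        (fun pi ix =>
          pi ++ [(PySem.List.pyRange 0 ix.1 1).foldl
            (fun idx j => if PySem.List.pyGetD sub j 0 < ix.2 then j + 1 else idx) 0])
        acc
      = acc ++ model (sub.take k) rest := by
  induction rest generalizing k acc with
  | nil => simp [PySem.List.enumerate_nil, model]
  | cons x rest ih =>
    have hk' : k < sub.length := by
      by_contra h
      have : sub.drop k = [] := List.drop_eq_nil_of_le (by omega)
      rw [← hrest] at this; simp at this
    have hx : x = sub[k] := by
      have h0 : (sub.drop k)[0]? = sub[k + 0]? := List.getElem?_drop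
      rw [← hrest] at h0
      simp [List.getElem?_eq_getElem hk'] at h0
      exact h0
    have hrest' : rest = sub.drop (k + 1) := by
      have := congrArg (List.drop 1) hrest
      simpa [List.drop_drop] using this
    have htake : sub.take (k + 1) = sub.take k ++ [x] := by
      rw [hx]; simpa using (List.take_concat_get sub k hk').symm
    rw [PySem.List.enumerate_cons, List.foldl_cons]
    have hcast : (k : Int) + 1 = ((k + 1 : Nat) : Int) := by push_cast; ring
    rw [hcast, ih (k + 1) _ hrest' (by omega)]
    simp only [model, ← htake]
    rw [inner_rms sub x k (by omega)]
    simp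

-- ===== VERDICT (by name: the statement is the Claim_ definition above) =====
theorem encode_pi_py_spec : Claim_equal_encode_pi_py := by
  intro sub _
  show encode_pi_py sub = encode_pi_py_alt sub
  have hA : encode_pi_py sub = model [] sub := by
    have := A_fold sub sub 0 [] (by simp) (by simp)
    simpa [encode_pi_py] using this
  have hB : encode_pi_py_alt sub = model [] sub := by
    have := altGo_model sub []
    simpa [encode_pi_py_alt, cs, csAux] using this
  rw [hA, hB]
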